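-- pv_equiv track=rewrite | github.com/IES-Rafael-Alberti/dam1-2425-ejercicios-u2-Luismi0202 | src/Bucles/ej22_03.py | num_impares
-- ===== SOURCE A (Python) =====
-- def num_impares(num):
--     """
-- Args:
-- for i in range(1,num + 1):--> Para i en el rango de 1 hasta num (se le pone +1 porque python empieza a contar desde 0)
-- if i == num:
-- contador += f"{i}"+"."--> Si i es igual al número introducido, se acumulará al contador seguido de un punto en lugar de una coma, para indicar que es el último.
-- elif i %2 == 1:
-- contador += f"{i}"+"," --> Si el número es impar, se acumulará seguido de una coma.
-- elif i %2 == 0: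
-- i = None --> Si es para, la variable i no valdra nada.
-- """
--     contador = ""
--     for i in range(1,num + 1):
--         if i == num:
--             contador += f"{i}"+"."
--         elif i %2 == 1:
--             contador += f"{i}"+","
--         elif i %2 == 0:
--             i = None
--     return contador
-- ===== SOURCE B (Python) =====
-- def num_impares(num):
--     if num < 1:
--         return ""
--     body = "".join(f"{i}," for i in range(1, num, 2))
--     return body + f"{num}."
-- ===== Notes on version B (the rewrite author's own statement) =====
-- stated objective: simpler
-- what changed: B drops A's per-element if/elif parity-and-equality branching over every integer in range(1,num+1): it iterates only the odd numbers below num with range(1,num,2), joins them with str.join, and appends the final number (with its period) unconditionally as a separate step.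
import Mathlib
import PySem

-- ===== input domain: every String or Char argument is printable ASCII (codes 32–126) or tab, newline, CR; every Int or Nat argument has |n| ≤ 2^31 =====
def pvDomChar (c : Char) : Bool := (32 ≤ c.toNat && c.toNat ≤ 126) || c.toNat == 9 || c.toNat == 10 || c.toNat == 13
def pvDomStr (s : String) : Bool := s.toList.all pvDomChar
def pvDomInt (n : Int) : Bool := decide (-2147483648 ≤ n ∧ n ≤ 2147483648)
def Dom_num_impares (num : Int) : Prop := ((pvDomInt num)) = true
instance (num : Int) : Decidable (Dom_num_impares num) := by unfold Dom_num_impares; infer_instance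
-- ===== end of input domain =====

-- B builds the comma-joined odd prefix by iterating only the odds below num and
-- appends the final number unconditionally, instead of A's per-element branching. Objective: simpler.

-- ===== PORT A =====
def num_impares (num : Int) : String :=
  (PySem.List.pyRange 1 (num + 1) 1).foldl
    (fun contador i =>
      if i == num then contador ++ (PySem.Int.toStr i ++ ".")
      else if PySem.Int.mod i 2 == 1 then contador ++ (PySem.Int.toStr i ++ ",")
      else contador) ""

-- ===== PORT B =====
def num_impares_alt (num : Int) : String :=
  if num < 1 then ""
  else
    PySem.Str.join "" ((PySem.List.pyRange 1 num 2).map (fun i => PySem.Int.toStr i ++ ","))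
      ++ (PySem.Int.toStr num ++ ".")

-- ===== PRECONDITION & SPEC =====
def Spec_num_impares (num : Int) (out : String) : Prop := out = num_impares_alt num
instance (num : Int) (out : String) : Decidable (Spec_num_impares num out) := by unfold Spec_num_impares; infer_instance

-- ===== CLAIM (what is proved, stated in full; the proofs are below) =====
def Claim_equal_num_impares : Prop := ∀ (num : Int), Dom_num_impares num → Spec_num_impares num (num_impares num)

-- ===== LEMMAS AND PROOFS =====

theorem chars_join_nil_append (l : List (List Char)) (c : List Char) :
    PySem.Chars.join [] (l ++ [c]) = PySem.Chars.join [] l ++ c := by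
  induction l with
  | nil => simp [PySem.Chars.join_singleton, PySem.Chars.join_nil]
  | cons a t ih =>
    cases t with
    | nil => simp [PySem.Chars.join_cons_cons, PySem.Chars.join_singleton]
    | cons b r =>
      simp only [List.cons_append] at ih ⊢
      rw [PySem.Chars.join_cons_cons, ih, PySem.Chars.join_cons_cons]
      simp

theorem str_join_nil_append (l : List String) (x : String) :
    PySem.Str.join "" (l ++ [x]) = PySem.Str.join "" l ++ x := by
  apply String.toList_inj.mp
  simp [PySem.Str.toList_join, chars_join_nil_append]

theorem str_join_nil_nil : PySem.Str.join "" [] = "" := by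
  apply String.toList_inj.mp
  simp [PySem.Str.toList_join, PySem.Chars.join_nil]

theorem range2_succ (m : Nat) (h : 1 ≤ m) :
    PySem.List.pyRange 1 ((m : Int) + 1) 2 =
      PySem.List.pyRange 1 (m : Int) 2 ++ (if m % 2 = 1 then [(m : Int)] else []) := by
  rw [PySem.List.pyRange_of_pos 1 ((m : Int) + 1) (by norm_num),
      PySem.List.pyRange_of_pos 1 (m : Int) (by norm_num)]
  have h1 : (1 : Int) < (m : Int) + 1 := by exact_mod_cast Nat.lt_succ_of_le h
  rw [if_pos h1]
  by_cases h2 : (1 : Int) < (m : Int)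
  · rw [if_pos h2]
    have hm2 : 2 ≤ m := by exact_mod_cast h2
    have hcL : (((m : Int) + 1 - 1 + 2 - 1) / 2).toNat = (m + 1) / 2 := by
      have : ((m : Int) + 1 - 1 + 2 - 1) = ((m + 1 : Nat) : Int) := by push_cast; ring
      rw [this]; omega
    have hcR : (((m : Int) - 1 + 2 - 1) / 2).toNat = m / 2 := by
      have : ((m : Int) - 1 + 2 - 1) = ((m : Nat) : Int) := by ring
      rw [this]; omega
    rw [hcL, hcR]
    by_cases hpar : m % 2 = 1
    · rw [if_pos hpar]
      have : (m + 1) / 2 = m / 2 + 1 := by omega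
      rw [this, List.range_succ, List.map_append]
      congr 1
      simp only [List.map_cons, List.map_nil]
      congr 1
      push_cast
      omega
    · rw [if_neg hpar]
      have : (m + 1) / 2 = m / 2 := by omega
      rw [this]; simp
  · have hm1 : m = 1 := by omega
    subst hm1
    norm_num
theorem fmod_two_eq_one_iff (m : Nat) :
    (PySem.Int.mod (m : Int) 2 == 1) = decide (m % 2 = 1) := by
  have hf : PySem.Int.mod (m : Int) 2 = ((m % 2 : Nat) : Int) := by
    show Int.fmod (m : Int) 2 = ((m % 2 : Nat) : Int)
    rw [Int.fmod_eq_emod]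
    norm_num
  rw [hf]
  by_cases h : m % 2 = 1 <;> simp [h] ; omega

theorem odd_fold_eq_join (m : Nat) :
    (PySem.List.pyRange 1 (m : Int) 1).foldl
      (fun contador i =>
        if PySem.Int.mod i 2 == 1 then contador ++ (PySem.Int.toStr i ++ ",") else contador) ""
    = PySem.Str.join "" ((PySem.List.pyRange 1 (m : Int) 2).map (fun i => PySem.Int.toStr i ++ ",")) := by
  induction m with
  | zero =>
    simp only [Nat.cast_zero]
    rw [PySem.List.pyRange_one_eq_nil (by norm_num), PySem.List.pyRange_of_pos 1 0 (by norm_num)]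
    norm_num [str_join_nil_nil]
  | succ m ih =>
    by_cases hm : 1 ≤ m
    · have hle : (1 : Int) ≤ (m : Int) := by exact_mod_cast hm
      push_cast
      rw [PySem.List.pyRange_one_succ_right hle, List.foldl_append, range2_succ m hm]
      simp only [List.foldl_cons, List.foldl_nil]
      rw [fmod_two_eq_one_iff]
      by_cases hpar : m % 2 = 1
      · rw [if_pos hpar]
        simp only [hpar, decide_true, if_true, List.map_append, List.map_cons, List.map_nil]
        rw [str_join_nil_append, ih]
      · rw [if_neg hpar]
        simp only [hpar, decide_false, List.append_nil]
        exact ih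
    · have hm0 : m = 0 := by omega
      subst hm0
      norm_num
      rw [PySem.List.pyRange_of_pos 1 1 (by norm_num)]
      norm_num [str_join_nil_nil]

-- ===== VERDICT (by name: the statement is the Claim_ definition above) =====
theorem num_impares_spec : Claim_equal_num_impares := by
  intro num _
  unfold Spec_num_impares num_impares num_impares_alt
  by_cases h : num < 1
  · rw [if_pos h, PySem.List.pyRange_one_eq_nil (by omega)]
    rfl
  · rw [if_neg h]
    have h1 : (1 : Int) ≤ num := by omega
    rw [PySem.List.pyRange_one_succ_right h1, List.foldl_append]
    simp only [List.foldl_cons, List.foldl_nil, BEq.rfl, if_true]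
    congr 1
    rw [PySem.List.foldl_congr_mem' _ _
      (fun contador i =>
        if PySem.Int.mod i 2 == 1 then contador ++ (PySem.Int.toStr i ++ ",") else contador) _
      (by
        intro x hx acc
        have hxlt : x < num := (PySem.List.mem_pyRange_one.mp hx).2
        have : (x == num) = false := by simp; omega
        rw [this]; simp)]
    have hnn : num = ((num.toNat : Nat) : Int) := by omega
    rw [hnn]
    exact odd_fold_eq_join num.toNat
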